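-- pv_equiv track=rewrite | github.com/RohithBalasubramani/CommandCenter-Audit | backend/layer2/orchestrator.py | _format_pulseview
-- ===== SOURCE A (Python) =====
-- def _format_pulseview(devices: list, alerts: list) -> dict:
--     """Format data for pulseview widget — operational pulse overview."""
--     running = sum(1 for d in devices if d.get("status") == "running")
--     warning = sum(1 for d in devices if d.get("status") in ("warning", "maintenance"))
--     critical_alerts = sum(1 for a in alerts if a.get("severity") in ("critical", "high"))
--     return {
--         "totalDevices": len(devices),
--         "running": running,
--         "warning": warning,
--         "criticalAlerts": critical_alerts,
--     }
-- ===== SOURCE B (Python) =====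
-- def _format_pulseview(devices: list, alerts: list) -> dict:
--     """Format data for pulseview widget — operational pulse overview."""
--     status_counts = {}
--     for d in devices:
--         s = d.get("status")
--         status_counts[s] = status_counts.get(s, 0) + 1
--     severity_counts = {}
--     for a in alerts:
--         v = a.get("severity")
--         severity_counts[v] = severity_counts.get(v, 0) + 1
--     return {
--         "totalDevices": len(devices),
--         "running": status_counts.get("running", 0),
--         "warning": status_counts.get("warning", 0) + status_counts.get("maintenance", 0),
--         "criticalAlerts": severity_counts.get("critical", 0) + severity_counts.get("high", 0),
--     }
-- ===== Notes on version B (the rewrite author's own statement) =====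
-- stated objective: alternative
-- what changed: B builds a frequency dictionary of device statuses and one of alert severities (a single grouping pass over each list) and then reads the four counts out by key lookup, instead of A's three per-predicate comprehension scans that re-test every element against each status/severity.
import Mathlib
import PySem

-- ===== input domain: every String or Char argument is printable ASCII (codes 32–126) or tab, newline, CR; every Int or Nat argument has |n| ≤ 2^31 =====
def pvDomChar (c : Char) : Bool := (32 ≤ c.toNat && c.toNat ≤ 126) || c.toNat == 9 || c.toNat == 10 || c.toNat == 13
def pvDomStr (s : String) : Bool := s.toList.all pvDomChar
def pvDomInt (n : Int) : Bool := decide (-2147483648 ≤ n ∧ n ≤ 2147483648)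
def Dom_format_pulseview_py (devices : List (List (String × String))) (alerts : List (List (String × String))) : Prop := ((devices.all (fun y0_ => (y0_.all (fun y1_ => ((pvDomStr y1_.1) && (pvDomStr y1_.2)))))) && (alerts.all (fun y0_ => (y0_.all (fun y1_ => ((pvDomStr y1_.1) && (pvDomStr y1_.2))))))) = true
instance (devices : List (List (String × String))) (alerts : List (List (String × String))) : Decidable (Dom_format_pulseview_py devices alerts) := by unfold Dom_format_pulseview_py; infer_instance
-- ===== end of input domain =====

-- B builds a frequency dictionary per list (one grouping pass) and reads the four counts by key lookup, instead of A's three per-predicate scans; same return value.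
-- ===== PORT A =====
def format_pulseview_py (devices : List (List (String × String))) (alerts : List (List (String × String))) : List (String × Int) :=
  let running : Int := devices.foldl (fun acc d =>
      if List.lookup "status" d = some "running" then acc + 1 else acc) 0
  let warning : Int := devices.foldl (fun acc d =>
      if List.lookup "status" d = some "warning" ∨ List.lookup "status" d = some "maintenance" then acc + 1 else acc) 0
  let critical_alerts : Int := alerts.foldl (fun acc a =>
      if List.lookup "severity" a = some "critical" ∨ List.lookup "severity" a = some "high" then acc + 1 else acc) 0
  [("totalDevices", (devices.length : Int)), ("running", running),
   ("warning", warning), ("criticalAlerts", critical_alerts)]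

-- ===== PORT B =====
def format_pulseview_py_alt (devices : List (List (String × String))) (alerts : List (List (String × String))) : List (String × Int) :=
  let status_counts : PySem.Dict (Option String) Int :=
    devices.foldl (fun dct d =>
      dct.insert (List.lookup "status" d) (dct.getD (List.lookup "status" d) 0 + 1)) PySem.Dict.empty
  let severity_counts : PySem.Dict (Option String) Int :=
    alerts.foldl (fun dct a =>
      dct.insert (List.lookup "severity" a) (dct.getD (List.lookup "severity" a) 0 + 1)) PySem.Dict.empty
  [("totalDevices", (devices.length : Int)),
   ("running", status_counts.getD (some "running") 0),
   ("warning", status_counts.getD (some "warning") 0 + status_counts.getD (some "maintenance") 0),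
   ("criticalAlerts", severity_counts.getD (some "critical") 0 + severity_counts.getD (some "high") 0)]

-- ===== PRECONDITION & SPEC =====
def Spec_format_pulseview_py (devices : List (List (String × String))) (alerts : List (List (String × String))) (out : List (String × Int)) : Prop := out = format_pulseview_py_alt devices alerts
instance (devices : List (List (String × String))) (alerts : List (List (String × String))) (out : List (String × Int)) : Decidable (Spec_format_pulseview_py devices alerts out) := by unfold Spec_format_pulseview_py; infer_instance

-- ===== CLAIM =====
def Claim_equal_format_pulseview_py : Prop := ∀ (devices : List (List (String × String))) (alerts : List (List (String × String))), Dom_format_pulseview_py devices alerts → Spec_format_pulseview_py devices alerts (format_pulseview_py devices alerts)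

-- ===== LEMMAS AND PROOFS =====

-- A's counting fold equals countP
lemma pv_foldl_if_count {α : Type} (p : α → Prop) [DecidablePred p] (l : List α) (n : Int) :
    l.foldl (fun acc x => if p x then acc + 1 else acc) n
      = n + (l.countP (fun x => decide (p x)) : Int) := by
  induction l generalizing n with
  | nil => simp
  | cons x l ih =>
    by_cases h : p x <;>
      simp [List.foldl_cons, List.countP_cons, h, ih] <;> omega

-- counting elements equal to a or b (a ≠ b) splits into two counts
lemma pv_countP_or_aux {α : Type} [BEq α] [LawfulBEq α] [DecidableEq α] (a b : α)
    (hab : a ≠ b) (l : List α) :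
    l.countP (fun x => decide (x = a) || decide (x = b)) = l.count a + l.count b := by
  induction l with
  | nil => simp
  | cons x l ih =>
    simp only [List.countP_cons, List.count_cons, ih]
    rcases eq_or_ne x a with rfl | hx
    · simp [hab] <;> omega
    · rcases eq_or_ne x b with rfl | hx'
      · simp [hx] <;> omega
      · simp [hx, hx']

lemma pv_countP_or {α : Type} [BEq α] [LawfulBEq α] [DecidableEq α] (a b : α)
    (hab : a ≠ b) (l : List α) :
    l.countP (fun x => decide (x = a ∨ x = b)) = l.count a + l.count b := by
  have h : (fun x : α => decide (x = a ∨ x = b))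
      = (fun x : α => decide (x = a) || decide (x = b)) := by
    funext x; by_cases h1 : x = a <;> by_cases h2 : x = b <;> simp [h1, h2]
  rw [h]
  exact pv_countP_or_aux a b hab l

-- B's grouping fold over a list with a key function, read back at key v, is the count of v among the keys
lemma pv_getD_group {α κ : Type} [BEq κ] [LawfulBEq κ] (key : α → κ) (l : List α) (v : κ) :
    (l.foldl (fun (dct : PySem.Dict κ Int) x =>
        dct.insert (key x) (dct.getD (key x) 0 + 1)) PySem.Dict.empty).getD v 0
      = ((l.map key).count v : Int) := by
  rw [show (l.foldl (fun (dct : PySem.Dict κ Int) x =>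
        dct.insert (key x) (dct.getD (key x) 0 + 1)) PySem.Dict.empty)
      = ((l.map key).foldl (fun (dct : PySem.Dict κ Int) s =>
        dct.insert s (dct.getD s 0 + 1)) PySem.Dict.empty) from
      (List.foldl_map (f := key)
        (g := fun (dct : PySem.Dict κ Int) s => dct.insert s (dct.getD s 0 + 1))).symm]
  rw [PySem.Dict.getD_foldl_insert_add_one]
  simp

lemma pv_count_scan (key : List (String × String) → Option String)
    (l : List (List (String × String))) (v : String) :
    l.foldl (fun acc d => if key d = some v then acc + 1 else acc) (0 : Int)
      = ((l.map key).count (some v) : Int) := by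
  rw [pv_foldl_if_count (fun d => key d = some v) l 0]
  rw [List.count_eq_countP, List.countP_map]
  have hc : ∀ x ∈ l, ((decide (key x = some v)) = true
      ↔ ((fun s => s == some v) ∘ key) x = true) := by
    intro x _; simp
  rw [List.countP_congr hc]
  ring

lemma pv_count_scan_or (key : List (String × String) → Option String)
    (l : List (List (String × String))) (v w : String) (hvw : v ≠ w) :
    l.foldl (fun acc d => if key d = some v ∨ key d = some w then acc + 1 else acc) (0 : Int)
      = ((l.map key).count (some v) : Int) + ((l.map key).count (some w) : Int) := by
  rw [pv_foldl_if_count (fun d => key d = some v ∨ key d = some w) l 0]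
  have h1 : (l.countP fun x => decide (key x = some v ∨ key x = some w))
      = ((l.map key).countP (fun s => decide (s = some v ∨ s = some w))) := by
    rw [List.countP_map]; rfl
  rw [h1, pv_countP_or (some v) (some w) (by simp [hvw]) (l.map key)]
  push_cast
  ring

-- ===== VERDICT =====
theorem format_pulseview_py_spec : Claim_equal_format_pulseview_py := by
  intro devices alerts _
  unfold Spec_format_pulseview_py
  simp only [format_pulseview_py, format_pulseview_py_alt]
  rw [pv_count_scan (List.lookup "status") devices "running",
      pv_count_scan_or (List.lookup "status") devices "warning" "maintenance" (by decide),
      pv_count_scan_or (List.lookup "severity") alerts "critical" "high" (by decide),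
      pv_getD_group (List.lookup "status") devices (some "running"),
      pv_getD_group (List.lookup "status") devices (some "warning"),
      pv_getD_group (List.lookup "status") devices (some "maintenance"),
      pv_getD_group (List.lookup "severity") alerts (some "critical"),
      pv_getD_group (List.lookup "severity") alerts (some "high")]
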